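-- pv_equiv track=rewrite | github.com/TerenceGrover/simonSaysonPi | game_debug.py | required_landmarks_for_pose
-- ===== SOURCE A (Python) =====
-- LM = {
--     "NOSE": 0,
--     "L_EAR": 7,
--     "R_EAR": 8,
--     "L_SHO": 11,
--     "R_SHO": 12,
--     "L_ELB": 13,
--     "R_ELB": 14,
--     "L_WRI": 15,
--     "R_WRI": 16,
--     "L_HIP": 23,
--     "R_HIP": 24,
--     "L_KNE": 25,
--     "R_KNE": 26,
--     "L_ANK": 27,
--     "R_ANK": 28,
-- }
--
-- def required_landmarks_for_pose(pose_def):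
--     active = set(pose_def.get("active_features", []))
--     req = {LM["L_HIP"], LM["R_HIP"], LM["L_SHO"], LM["R_SHO"]}
--
--     if any(k.startswith("ang_elb") for k in active) or any("elb" in k for k in active):
--         req |= {LM["L_ELB"], LM["R_ELB"]}
--     if any(k.startswith("ang_kne") for k in active) or any("kne" in k for k in active):
--         req |= {LM["L_KNE"], LM["R_KNE"]}
--     if any("wri" in k for k in active) or any(k.startswith("ang_elb") for k in active):
--         req |= {LM["L_WRI"], LM["R_WRI"]}
--     if any("ank" in k for k in active):
--         req |= {LM["L_ANK"], LM["R_ANK"]}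
--     if any("nose" in k for k in active):
--         req |= {LM["NOSE"]}
--     if any("head" in k for k in active):
--         req |= {LM["L_EAR"], LM["R_EAR"]}
--
--     return sorted(req)
-- ===== SOURCE B (Python) =====
-- LM = {
--     "NOSE": 0,
--     "L_EAR": 7,
--     "R_EAR": 8,
--     "L_SHO": 11,
--     "R_SHO": 12,
--     "L_ELB": 13,
--     "R_ELB": 14,
--     "L_WRI": 15,
--     "R_WRI": 16,
--     "L_HIP": 23,
--     "R_HIP": 24,
--     "L_KNE": 25,
--     "R_KNE": 26,
--     "L_ANK": 27,
--     "R_ANK": 28,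
-- }
--
-- def required_landmarks_for_pose(pose_def):
--     # One pass over the features, collecting boolean flags; then build the
--     # result list directly in ascending landmark order (no set, no sort).
--     has_elb = has_kne = has_ang_elb = has_wri = has_ank = has_nose = has_head = False
--     for k in pose_def.get("active_features", []):
--         has_elb = has_elb or ("elb" in k)
--         has_kne = has_kne or ("kne" in k)
--         has_ang_elb = has_ang_elb or k.startswith("ang_elb")
--         has_wri = has_wri or ("wri" in k)
--         has_ank = has_ank or ("ank" in k)
--         has_nose = has_nose or ("nose" in k)
--         has_head = has_head or ("head" in k)
--
--     out = []
--     if has_nose: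
--         out.append(LM["NOSE"])
--     if has_head:
--         out += [LM["L_EAR"], LM["R_EAR"]]
--     out += [LM["L_SHO"], LM["R_SHO"]]
--     if has_elb:
--         out += [LM["L_ELB"], LM["R_ELB"]]
--     if has_wri or has_ang_elb:
--         out += [LM["L_WRI"], LM["R_WRI"]]
--     out += [LM["L_HIP"], LM["R_HIP"]]
--     if has_kne:
--         out += [LM["L_KNE"], LM["R_KNE"]]
--     if has_ank:
--         out += [LM["L_ANK"], LM["R_ANK"]]
--     return out
-- ===== Notes on version B (the rewrite author's own statement) =====
-- stated objective: simpler
-- what changed: Replaces A's set-of-landmarks built by six repeated any-scans over the feature set plus a final sort with one pass collecting boolean flags and a direct construction of the output list already in ascending order (no set, no sort).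
import Mathlib
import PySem

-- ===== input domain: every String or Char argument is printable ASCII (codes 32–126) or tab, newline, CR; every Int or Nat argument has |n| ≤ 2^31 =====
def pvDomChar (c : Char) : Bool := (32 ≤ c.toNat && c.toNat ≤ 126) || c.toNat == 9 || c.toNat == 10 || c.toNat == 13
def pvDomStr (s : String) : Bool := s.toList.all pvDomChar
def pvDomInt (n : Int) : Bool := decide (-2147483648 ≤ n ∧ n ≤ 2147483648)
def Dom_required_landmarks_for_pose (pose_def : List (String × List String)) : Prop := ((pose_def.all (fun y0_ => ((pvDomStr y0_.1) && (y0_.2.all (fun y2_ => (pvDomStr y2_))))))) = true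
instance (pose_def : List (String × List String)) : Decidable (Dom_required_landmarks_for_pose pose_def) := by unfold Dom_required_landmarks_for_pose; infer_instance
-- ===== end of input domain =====

-- B replaces A's six repeated scans over a set plus a final sort by one pass of
-- boolean flags and a direct construction of the output in ascending order (objective: simpler).

-- ===== PORT A =====
def required_landmarks_for_pose (pose_def : List (String × List String)) : List Int :=
  let active : PySem.Set String :=
    PySem.Set.ofList ((pose_def.lookup "active_features").getD [])
  let req : PySem.Set Int := PySem.Set.ofList [23, 24, 11, 12]
  let req := if active.any (fun k => PySem.Str.startswith k "ang_elb")
                || active.any (fun k => PySem.Str.isIn "elb" k) then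
      PySem.Set.union req [13, 14] else req
  let req := if active.any (fun k => PySem.Str.startswith k "ang_kne")
                || active.any (fun k => PySem.Str.isIn "kne" k) then
      PySem.Set.union req [25, 26] else req
  let req := if active.any (fun k => PySem.Str.isIn "wri" k)
                || active.any (fun k => PySem.Str.startswith k "ang_elb") then
      PySem.Set.union req [15, 16] else req
  let req := if active.any (fun k => PySem.Str.isIn "ank" k) then
      PySem.Set.union req [27, 28] else req
  let req := if active.any (fun k => PySem.Str.isIn "nose" k) then
      PySem.Set.union req [0] else req
  let req := if active.any (fun k => PySem.Str.isIn "head" k) then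
      PySem.Set.union req [7, 8] else req
  PySem.List.sorted req (fun x => x) false

-- ===== PORT B =====
-- one flag per feature kind: (elb, kne, ang_elb, wri, ank, nose, head)
def pvFlags : Type := Bool × Bool × Bool × Bool × Bool × Bool × Bool

def pvStep (f : pvFlags) (k : String) : pvFlags :=
  (f.1 || PySem.Str.isIn "elb" k,
   f.2.1 || PySem.Str.isIn "kne" k,
   f.2.2.1 || PySem.Str.startswith k "ang_elb",
   f.2.2.2.1 || PySem.Str.isIn "wri" k,
   f.2.2.2.2.1 || PySem.Str.isIn "ank" k,
   f.2.2.2.2.2.1 || PySem.Str.isIn "nose" k,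
   f.2.2.2.2.2.2 || PySem.Str.isIn "head" k)

def required_landmarks_for_pose_alt (pose_def : List (String × List String)) : List Int :=
  let active := (pose_def.lookup "active_features").getD []
  let f : pvFlags := active.foldl pvStep (false, false, false, false, false, false, false)
  (if f.2.2.2.2.2.1 then [0] else [])
    ++ (if f.2.2.2.2.2.2 then [7, 8] else [])
    ++ [11, 12]
    ++ (if f.1 then [13, 14] else [])
    ++ (if f.2.2.2.1 || f.2.2.1 then [15, 16] else [])
    ++ [23, 24]
    ++ (if f.2.1 then [25, 26] else [])
    ++ (if f.2.2.2.2.1 then [27, 28] else [])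

-- ===== PRECONDITION & SPEC =====
def Spec_required_landmarks_for_pose (pose_def : List (String × List String)) (out : List Int) : Prop := out = required_landmarks_for_pose_alt pose_def
instance (pose_def : List (String × List String)) (out : List Int) : Decidable (Spec_required_landmarks_for_pose pose_def out) := by unfold Spec_required_landmarks_for_pose; infer_instance

-- ===== CLAIM =====
def Claim_equal_required_landmarks_for_pose : Prop := ∀ (pose_def : List (String × List String)), Dom_required_landmarks_for_pose pose_def → Spec_required_landmarks_for_pose pose_def (required_landmarks_for_pose pose_def)

-- ===== LEMMAS AND PROOFS =====

-- any over set(xs) equals any over xs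
lemma pv_any_ofList (xs : List String) (p : String → Bool) :
    (PySem.Set.ofList xs).any p = xs.any p := by
  apply Bool.eq_iff_iff.mpr
  simp only [List.any_eq_true]
  constructor
  · rintro ⟨x, hx, hp⟩; exact ⟨x, (PySem.Set.mem_ofList xs x).mp hx, hp⟩
  · rintro ⟨x, hx, hp⟩; exact ⟨x, (PySem.Set.mem_ofList xs x).mpr hx, hp⟩

-- a key starting with "ang_elb" contains "elb"
lemma pv_ang_elb_sub (k : String) (h : PySem.Str.startswith k "ang_elb" = true) :
    PySem.Str.isIn "elb" k = true := by
  rw [PySem.Str.isIn_iff_infix]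
  have hp : "ang_elb".toList <+: k.toList := by
    have := (PySem.Str.startswith_eq k "ang_elb")
    rw [this] at h; exact (PySem.Chars.startswith_iff _ _).mp h
  exact List.IsInfix.trans (by decide : "elb".toList <:+: "ang_elb".toList) hp.isInfix

lemma pv_ang_kne_sub (k : String) (h : PySem.Str.startswith k "ang_kne" = true) :
    PySem.Str.isIn "kne" k = true := by
  rw [PySem.Str.isIn_iff_infix]
  have hp : "ang_kne".toList <+: k.toList := by
    have := (PySem.Str.startswith_eq k "ang_kne")
    rw [this] at h; exact (PySem.Chars.startswith_iff _ _).mp h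
  exact List.IsInfix.trans (by decide : "kne".toList <:+: "ang_kne".toList) hp.isInfix

-- absorbing the subsumed startswith test into the substring test
lemma pv_or_absorb (xs : List String) (p q : String → Bool)
    (h : ∀ k, p k = true → q k = true) :
    (xs.any p || xs.any q) = xs.any q := by
  cases hq : xs.any q with
  | true => simp
  | false =>
    simp only [Bool.or_false]
    cases hp : xs.any p with
    | false => rfl
    | true =>
      exfalso
      obtain ⟨x, hx, hpx⟩ := List.any_eq_true.mp hp
      have : xs.any q = true := List.any_eq_true.mpr ⟨x, hx, h x hpx⟩
      simp [this] at hq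

-- the flag fold computes exactly the seven `any` scans
lemma pv_foldl_flags (xs : List String) (f : pvFlags) :
    xs.foldl pvStep f =
      (f.1 || xs.any (fun k => PySem.Str.isIn "elb" k),
       f.2.1 || xs.any (fun k => PySem.Str.isIn "kne" k),
       f.2.2.1 || xs.any (fun k => PySem.Str.startswith k "ang_elb"),
       f.2.2.2.1 || xs.any (fun k => PySem.Str.isIn "wri" k),
       f.2.2.2.2.1 || xs.any (fun k => PySem.Str.isIn "ank" k),
       f.2.2.2.2.2.1 || xs.any (fun k => PySem.Str.isIn "nose" k),
       f.2.2.2.2.2.2 || xs.any (fun k => PySem.Str.isIn "head" k)) := by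
  induction xs generalizing f with
  | nil => simp
  | cons x xs ih =>
    simp only [List.foldl_cons, ih, List.any_cons, pvStep, Bool.or_assoc]

-- ===== VERDICT =====
theorem required_landmarks_for_pose_spec : Claim_equal_required_landmarks_for_pose := by
  unfold Claim_equal_required_landmarks_for_pose
  intro pose_def _
  unfold Spec_required_landmarks_for_pose required_landmarks_for_pose required_landmarks_for_pose_alt
  simp only []
  generalize (pose_def.lookup "active_features").getD [] = xs
  rw [pv_foldl_flags]
  simp only [pv_any_ofList, Bool.false_or]
  rw [pv_or_absorb xs _ _ pv_ang_elb_sub, pv_or_absorb xs _ _ pv_ang_kne_sub]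
  cases hE : xs.any (fun k => PySem.Str.isIn "elb" k) <;>
  cases hK : xs.any (fun k => PySem.Str.isIn "kne" k) <;>
  cases hW : (xs.any (fun k => PySem.Str.isIn "wri" k) || xs.any (fun k => PySem.Str.startswith k "ang_elb")) <;>
  cases hA : xs.any (fun k => PySem.Str.isIn "ank" k) <;>
  cases hN : xs.any (fun k => PySem.Str.isIn "nose" k) <;>
  cases hH : xs.any (fun k => PySem.Str.isIn "head" k) <;> decide
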